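-- pv_equiv track=rewrite | github.com/Hmidiayoub/Leetcode-problems | phoneNumber_word.py | isWordValid
-- ===== SOURCE A (Python) =====
-- def isWordValid(word, programResult) :
--     word_pointer = 0
--     exist = [False] * len(word)
--     for i in range(len(word)) :
--         while word_pointer < len(programResult) :
--             if word[i] in programResult[word_pointer] :
--                 exist[i] = True
--                 word_pointer += 1
--                 break
--             else :
--                 word_pointer += 1
--     if all(exist) :
--         result = True
--     else :
--         result = False
--     return result
-- ===== SOURCE B (Python) =====
-- def isWordValid(word, programResult):
--     # Dynamic programming over reachable prefix lengths (NFA-style boolean table):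
--     # reach[i] == True iff word[:i] can be matched against a strictly increasing
--     # sequence of entries among those processed so far.
--     n = len(word)
--     reach = [True] + [False] * n
--     for entry in programResult:
--         for j in reversed(range(n)):
--             if reach[j] and word[j] in entry:
--                 reach[j + 1] = True
--     return reach[n]
-- ===== Notes on version B (the rewrite author's own statement) =====
-- stated objective: alternative
-- what changed: Replaces A's greedy two-pointer scan with an `exist` boolean array by a dynamic-programming/NFA-style simulation: a boolean table reach[0..n] of matchable word-prefix lengths, updated for every entry, with reach[len(word)] as the answer.
import Mathlib
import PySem

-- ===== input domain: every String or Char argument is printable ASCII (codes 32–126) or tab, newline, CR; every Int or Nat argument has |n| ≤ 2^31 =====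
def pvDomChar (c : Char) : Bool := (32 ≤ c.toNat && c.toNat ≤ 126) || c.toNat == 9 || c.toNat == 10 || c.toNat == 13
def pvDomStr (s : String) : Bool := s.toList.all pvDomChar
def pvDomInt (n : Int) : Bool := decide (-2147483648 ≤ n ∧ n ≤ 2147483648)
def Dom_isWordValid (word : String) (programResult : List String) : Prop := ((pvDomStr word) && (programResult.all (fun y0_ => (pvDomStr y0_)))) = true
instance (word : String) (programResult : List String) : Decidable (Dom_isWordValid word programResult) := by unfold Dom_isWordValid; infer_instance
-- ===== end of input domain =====

-- B replaces A's greedy pointer scan (with its `exist` boolean array) by a dynamic-programming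
-- table of matchable word-prefix lengths, updated once per entry (objective: alternative algorithm).

-- ===== PORT A =====
-- `c in s` for a single character c (Python substring membership, exact via PySem)
def pvCharIn (c : Char) (s : String) : Bool := PySem.Str.isIn (String.ofList [c]) s

-- the `while word_pointer < len(programResult)` loop for one character of word:
-- returns (whether exist[i] was set, the new word_pointer)
def isWordValid_scan (c : Char) (pr : List String) (wp : Nat) : Bool × Nat :=
  if h : wp < pr.length then
    if pvCharIn c pr[wp] then (true, wp + 1)
    else isWordValid_scan c pr (wp + 1)
  else (false, wp)
termination_by pr.length - wp

def isWordValid (word : String) (programResult : List String) : Bool :=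
  let w := word.toList
  let st :=
    (List.range w.length).foldl
      (fun (st : Nat × List Bool) i =>
        let r := isWordValid_scan (w.getD i ' ') programResult st.1
        (r.2, if r.1 then st.2.set i true else st.2))
      (0, List.replicate w.length false)
  st.2.all id

-- ===== PORT B =====
-- all list indexing in B's Python (reach[j], word[j], reach[j+1], reach[n]) is in range,
-- so getD / set are exact here.
def isWordValid_alt (word : String) (programResult : List String) : Bool :=
  let w := word.toList
  let n := w.length
  let reach :=
    programResult.foldl
      (fun (R : List Bool) entry =>
        ((List.range n).reverse).foldl
          (fun (R : List Bool) j =>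
            if R.getD j false && pvCharIn (w.getD j ' ') entry then R.set (j + 1) true else R)
          R)
      ([true] ++ List.replicate n false)
  reach.getD n false

-- ===== PRECONDITION & SPEC =====
def Spec_isWordValid (word : String) (programResult : List String) (out : Bool) : Prop := out = isWordValid_alt word programResult
instance (word : String) (programResult : List String) (out : Bool) : Decidable (Spec_isWordValid word programResult out) := by unfold Spec_isWordValid; infer_instance

-- ===== CLAIM (what is proved, stated in full; the proofs are below) =====
def Claim_equal_isWordValid : Prop := ∀ (word : String) (programResult : List String), Dom_isWordValid word programResult → Spec_isWordValid word programResult (isWordValid word programResult)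

-- ===== LEMMAS AND PROOFS =====

-- list-level version of A's inner scan: (found, number of entries consumed)
def pvInnerL (c : Char) : List String → Bool × Nat
  | [] => (false, 0)
  | e :: es =>
    if pvCharIn c e then (true, 1)
    else
      let r := pvInnerL c es
      (r.1, r.2 + 1)

-- A's greedy result, recursing over the word
def pvGreedy : List Char → List String → Bool
  | [], _ => true
  | c :: cs, l =>
    let r := pvInnerL c l
    r.1 && pvGreedy cs (l.drop r.2)

-- subsequence check with the word suffix explicit (common middle ground of the two proofs)
def pvSub : List Char → List String → Bool
  | r, [] => r.isEmpty
  | [], _ :: es => pvSub [] es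
  | c :: cs, e :: es => pvSub (if pvCharIn c e then cs else c :: cs) es

-- the greedy pointer step (one entry), the abstract state both invariants are phrased in
def pvStep (w : List Char) (e : String) (j : Nat) : Nat :=
  if j < w.length && pvCharIn (w.getD j ' ') e then j + 1 else j

theorem pvInnerL_snd_le (c : Char) (l : List String) : (pvInnerL c l).2 ≤ l.length := by
  induction l with
  | nil => simp [pvInnerL]
  | cons e es ih =>
    by_cases h : pvCharIn c e = true <;> simp [pvInnerL, h] <;> omega

theorem scan_eq (c : Char) (pr : List String) :
    ∀ k wp, pr.length - wp = k → wp ≤ pr.length →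
      isWordValid_scan c pr wp =
        ((pvInnerL c (pr.drop wp)).1, wp + (pvInnerL c (pr.drop wp)).2) := by
  intro k
  induction k with
  | zero =>
    intro wp hk hle
    have h : wp = pr.length := by omega
    rw [isWordValid_scan]
    simp [h, pvInnerL]
  | succ n ih =>
    intro wp hk hle
    have hlt : wp < pr.length := by omega
    have hdrop : pr.drop wp = pr[wp] :: pr.drop (wp + 1) := List.drop_eq_getElem_cons hlt
    rw [isWordValid_scan, dif_pos hlt]
    by_cases h : pvCharIn c pr[wp] = true
    · rw [if_pos h, hdrop]
      simp [pvInnerL, h]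
    · rw [if_neg h, ih (wp + 1) (by omega) (by omega), hdrop]
      simp [pvInnerL, h]
      omega

theorem pvSub_nil_left : ∀ l, pvSub [] l = true := by
  intro l; induction l with
  | nil => simp [pvSub]
  | cons e es ih => simpa [pvSub] using ih

theorem greedy_eq_sub : ∀ (l : List String) (w : List Char), pvGreedy w l = pvSub w l := by
  intro l
  induction l with
  | nil =>
    intro w
    cases w with
    | nil => simp [pvGreedy, pvSub]
    | cons c cs => simp [pvGreedy, pvInnerL, pvSub]
  | cons e es ih =>
    intro w
    cases w with
    | nil => simp [pvGreedy, pvSub_nil_left]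
    | cons c cs =>
      by_cases h : pvCharIn c e = true
      · simp [pvGreedy, pvInnerL, pvSub, h, ih]
      · have hstep : pvGreedy (c :: cs) (e :: es) = pvGreedy (c :: cs) es := by
          simp [pvGreedy, pvInnerL, h]
        rw [hstep, ih]
        simp [pvSub, h]

-- the greedy pointer fold agrees with pvSub
theorem ptr_eq_sub (w : List Char) :
    ∀ (l : List String) (j : Nat), j ≤ w.length →
      decide ((l.foldl (fun (j : Nat) entry => pvStep w entry j) j) = w.length)
      = pvSub (w.drop j) l := by
  intro l
  induction l with
  | nil =>
    intro j hj
    simp only [List.foldl_nil, pvSub]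
    by_cases h : j = w.length
    · simp [h]
    · have : ¬ w.length ≤ j := by omega
      simp [h, List.drop_eq_nil_iff, this]
  | cons e es ih =>
    intro j hj
    by_cases hlt : j < w.length
    · have hdrop : w.drop j = w[j] :: w.drop (j + 1) := List.drop_eq_getElem_cons hlt
      have hget : w.getD j ' ' = w[j] := List.getD_eq_getElem w ' ' hlt
      by_cases h : pvCharIn w[j] e = true
      · have hstep : pvStep w e j = j + 1 := by
          unfold pvStep; rw [hget]; simp [hlt, h]
        simp only [List.foldl_cons, hstep]
        rw [ih (j + 1) (by omega), hdrop]
        simp [pvSub, h]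
      · have hstep : pvStep w e j = j := by
          unfold pvStep; rw [hget]; simp [h]
        simp only [List.foldl_cons, hstep]
        rw [ih j hj, hdrop]
        simp [pvSub, h]
    · have hj' : j = w.length := by omega
      have hdrop : w.drop j = [] := by rw [List.drop_eq_nil_iff]; omega
      have hstep : pvStep w e j = j := by
        unfold pvStep; simp [hlt]
      rw [List.foldl_cons, hstep, ih j hj, hdrop]
      simp [pvSub_nil_left]

theorem foldA_eq_greedy (w : List Char) (pr : List String) :
    ∀ (k i wp : Nat) (E : List Bool), i + k = w.length → wp ≤ pr.length →
      E.length = w.length → (∀ j, i ≤ j → E.getD j false = false) →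
      (((List.range' i k).foldl
        (fun (st : Nat × List Bool) i =>
          let r := isWordValid_scan (w.getD i ' ') pr st.1
          (r.2, if r.1 then st.2.set i true else st.2)) (wp, E)).2.all id)
      = ((E.take i).all id && pvGreedy (w.drop i) (pr.drop wp)) := by
  intro k
  induction k with
  | zero =>
    intro i wp E hik hwp hE hfalse
    have h1 : E.take i = E := List.take_of_length_le (by omega)
    have h2 : w.drop i = [] := by rw [List.drop_eq_nil_iff]; omega
    rw [show List.range' i 0 = [] from rfl]
    simp [h1, h2, pvGreedy]
  | succ n ih =>
    intro i wp E hik hwp hE hfalse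
    have hilt : i < w.length := by omega
    have hiE : i < E.length := by omega
    have hEi : E[i] = false := by
      have := hfalse i (le_refl i)
      rwa [List.getD_eq_getElem E false hiE] at this
    have hscan := scan_eq (w.getD i ' ') pr (pr.length - wp) wp rfl hwp
    set c := w.getD i ' ' with hc
    set f := (pvInnerL c (pr.drop wp)).1 with hf
    set d := (pvInnerL c (pr.drop wp)).2 with hd
    have hwp' : wp + d ≤ pr.length := by
      have h1 := pvInnerL_snd_le c (pr.drop wp)
      rw [List.length_drop] at h1
      omega
    have hrange : List.range' i (n + 1) = i :: List.range' (i + 1) n := List.range'_succ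
    set E' : List Bool := if f then E.set i true else E with hE'
    have hE'len : E'.length = w.length := by
      rw [hE']; split <;> simp [hE]
    have hE'false : ∀ j, i + 1 ≤ j → E'.getD j false = false := by
      intro j hj
      rw [hE']
      have hne : i ≠ j := by omega
      split
      · rw [List.getD_eq_getElem?_getD, List.getElem?_set_ne hne,
          ← List.getD_eq_getElem?_getD]
        exact hfalse j (by omega)
      · exact hfalse j (by omega)
    have hstep :
        ((List.range' i (n + 1)).foldl
          (fun (st : Nat × List Bool) i =>
            let r := isWordValid_scan (w.getD i ' ') pr st.1
            (r.2, if r.1 then st.2.set i true else st.2)) (wp, E))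
        = ((List.range' (i + 1) n).foldl
          (fun (st : Nat × List Bool) i =>
            let r := isWordValid_scan (w.getD i ' ') pr st.1
            (r.2, if r.1 then st.2.set i true else st.2)) (wp + d, E')) := by
      rw [hrange, List.foldl_cons]
      simp only [hscan, ← hc, hE']
    rw [hstep, ih (i + 1) (wp + d) E' (by omega) hwp' hE'len hE'false]
    have htake : (E'.take (i + 1)).all id = ((E.take i).all id && f) := by
      have h1 : E'.take (i + 1) = E'.take i ++ E'[i]?.toList := List.take_add_one
      have h2 : E'.take i = E.take i := by
        rw [hE']; split
        · rw [List.set_eq_take_append_cons_drop, if_pos hiE,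
            List.take_append_of_le_length (by simp; omega), List.take_take]
          simp
        · rfl
      have h3 : E'[i]? = some f := by
        rw [hE']
        split
        · next hft => rw [List.getElem?_set_self (by omega)]; simp [hft]
        · next hft =>
          rw [List.getElem?_eq_getElem hiE, hEi]
          simp at hft
          simp [hft]
      rw [h1, h2, h3, List.all_append]
      simp
    rw [htake]
    have hdropw : w.drop i = c :: w.drop (i + 1) := by
      rw [hc, List.getD_eq_getElem w ' ' hilt]
      exact List.drop_eq_getElem_cons hilt
    have hdd : (pr.drop wp).drop (pvInnerL c (pr.drop wp)).2 = pr.drop (wp + d) := by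
      rw [List.drop_drop]
    have hgreedy : pvGreedy (w.drop i) (pr.drop wp)
        = (f && pvGreedy (w.drop (i + 1)) (pr.drop (wp + d))) := by
      rw [hdropw]
      show ((pvInnerL c (pr.drop wp)).1 &&
        pvGreedy (w.drop (i + 1)) ((pr.drop wp).drop (pvInnerL c (pr.drop wp)).2)) = _
      rw [hdd, ← hf]
    rw [hgreedy, Bool.and_assoc]

-- ===================== B-side: the DP table is the indicator of the greedy pointer ===========

-- the table mid-entry, with the membership test for index J abstracted as a Bool c:
-- positions ≤ J true, and J+1 already true once index J has been processed
-- (processing is descending; indices ≥ m are the processed ones)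
def pvInd2 (n : Nat) (c : Bool) (m J : Nat) : List Bool :=
  (List.range (n + 1)).map
    (fun i => decide (i ≤ J ∨ (i = J + 1 ∧ m ≤ J ∧ J < n ∧ c = true)))

-- the table between entries: the indicator of the pointer
def pvIndP (n J : Nat) : List Bool :=
  (List.range (n + 1)).map (fun i => decide (i ≤ J))

theorem pvInd2_getD (n : Nat) (c : Bool) (m J i : Nat) (hi : i < n + 1) :
    (pvInd2 n c m J).getD i false
      = decide (i ≤ J ∨ (i = J + 1 ∧ m ≤ J ∧ J < n ∧ c = true)) := by
  rw [List.getD_eq_getElem _ _ (by simp [pvInd2]; omega)]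
  simp [pvInd2]

theorem pvInd2_step (n : Nat) (c b : Bool) (m J : Nat)
    (hm : m < n) (hbc : m = J → b = c) :
    (if (pvInd2 n c (m + 1) J).getD m false && b
      then (pvInd2 n c (m + 1) J).set (m + 1) true else pvInd2 n c (m + 1) J)
    = pvInd2 n c m J := by
  have hgd : (pvInd2 n c (m + 1) J).getD m false = decide (m ≤ J) := by
    rw [pvInd2_getD n c (m + 1) J m (by omega)]
    cases c <;> simp only [decide_eq_decide, and_true, Bool.false_eq_true, and_false, or_false] <;> omega
  rw [hgd]
  by_cases hfire : (decide (m ≤ J) && b) = true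
  · rw [if_pos hfire]
    simp only [Bool.and_eq_true, decide_eq_true_eq] at hfire
    obtain ⟨hmJ, hb⟩ := hfire
    apply List.ext_getElem (by simp [pvInd2])
    intro i hi1 hi2
    simp only [pvInd2, List.getElem_set, List.getElem_map, List.getElem_range]
    by_cases him : m + 1 = i
    · rw [if_pos him]
      by_cases hmeq : m = J
      · have hc : c = true := by rw [← hbc hmeq, hb]
        subst hmeq
        symm
        rw [decide_eq_true_iff]
        exact Or.inr ⟨him.symm, le_refl m, hm, hc⟩
      · symm
        rw [decide_eq_true_iff]
        exact Or.inl (by omega)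
    · rw [if_neg him]
      cases c <;> simp only [decide_eq_decide, and_true, Bool.false_eq_true, and_false, or_false] <;> omega
  · rw [if_neg hfire]
    apply List.ext_getElem (by simp [pvInd2])
    intro i hi1 hi2
    simp only [pvInd2, List.getElem_map, List.getElem_range]
    by_cases hmJ : m ≤ J
    · have hb : b = false := by
        cases b
        · rfl
        · exact absurd (by simp [hmJ]) hfire
      by_cases hmeq : m = J
      · have hcf : c = false := by rw [← hbc hmeq, hb]
        subst hcf
        simp
      · cases c <;> simp only [decide_eq_decide, and_true, Bool.false_eq_true, and_false, or_false] <;> omega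
    · cases c <;> simp only [decide_eq_decide, and_true, Bool.false_eq_true, and_false, or_false] <;> omega

theorem pvInner_eq (w : List Char) (e : String) :
    ∀ m J, m ≤ w.length → J ≤ w.length →
      ((List.range m).reverse).foldl
        (fun (R : List Bool) j =>
          if R.getD j false && pvCharIn (w.getD j ' ') e then R.set (j + 1) true else R)
        (pvInd2 w.length (pvCharIn (w.getD J ' ') e) m J)
      = pvInd2 w.length (pvCharIn (w.getD J ' ') e) 0 J := by
  intro m
  induction m with
  | zero => intro J _ _; simp
  | succ m ih =>
    intro J hm hJ
    rw [List.range_succ, List.reverse_append]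
    simp only [List.reverse_singleton, List.singleton_append, List.foldl_cons]
    rw [pvInd2_step w.length (pvCharIn (w.getD J ' ') e) (pvCharIn (w.getD m ' ') e) m J
      (by omega) (by intro h; rw [h])]
    exact ih J (by omega) hJ

theorem pvInd2_top (n : Nat) (c : Bool) (J : Nat) (hJ : J ≤ n) :
    pvInd2 n c n J = pvIndP n J := by
  unfold pvInd2 pvIndP
  apply List.map_congr_left
  intro i hi
  cases c <;> simp only [decide_eq_decide, and_true, Bool.false_eq_true, and_false, or_false] <;> omega

theorem pvInd2_zero (w : List Char) (e : String) (J : Nat) :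
    pvInd2 w.length (pvCharIn (w.getD J ' ') e) 0 J = pvIndP w.length (pvStep w e J) := by
  unfold pvInd2 pvIndP pvStep
  cases hc : pvCharIn (w.getD J ' ') e
  · rw [if_neg (by simp)]
    apply List.map_congr_left
    intro i hi
    simp only [Bool.false_eq_true, and_false, or_false]
  · by_cases hlt : J < w.length
    · rw [if_pos (by simp [hlt])]
      apply List.map_congr_left
      intro i hi
      simp only [decide_eq_decide, and_true]
      omega
    · rw [if_neg (by simp [hlt])]
      apply List.map_congr_left
      intro i hi
      simp only [decide_eq_decide, and_true]
      omega

theorem pvStep_le (w : List Char) (e : String) (J : Nat) (hJ : J ≤ w.length) :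
    pvStep w e J ≤ w.length := by
  unfold pvStep
  by_cases h : (decide (J < w.length) && pvCharIn (w.getD J ' ') e) = true
  · rw [if_pos h]
    simp only [Bool.and_eq_true, decide_eq_true_eq] at h
    omega
  · rw [if_neg h]; exact hJ

theorem pvPtr_le (w : List Char) :
    ∀ (l : List String) (J : Nat), J ≤ w.length →
      l.foldl (fun (j : Nat) entry => pvStep w entry j) J ≤ w.length := by
  intro l
  induction l with
  | nil => intro J hJ; simpa using hJ
  | cons e es ih =>
    intro J hJ
    rw [List.foldl_cons]
    exact ih _ (pvStep_le w e J hJ)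

theorem pvOuter_eq (w : List Char) :
    ∀ (l : List String) (J : Nat), J ≤ w.length →
      l.foldl
        (fun (R : List Bool) entry =>
          ((List.range w.length).reverse).foldl
            (fun (R : List Bool) j =>
              if R.getD j false && pvCharIn (w.getD j ' ') entry then R.set (j + 1) true else R)
            R)
        (pvIndP w.length J)
      = pvIndP w.length (l.foldl (fun (j : Nat) entry => pvStep w entry j) J) := by
  intro l
  induction l with
  | nil => intro J _; simp
  | cons e es ih =>
    intro J hJ
    simp only [List.foldl_cons]
    rw [← pvInd2_top w.length (pvCharIn (w.getD J ' ') e) J hJ,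
      pvInner_eq w e w.length J (le_refl _) hJ, pvInd2_zero]
    exact ih _ (pvStep_le w e J hJ)

theorem pvIndP_init (w : List Char) :
    ([true] ++ List.replicate w.length false) = pvIndP w.length 0 := by
  apply List.ext_getElem (by simp [pvIndP])
  intro i hi1 hi2
  simp only [pvIndP, List.getElem_map, List.getElem_range]
  cases i with
  | zero => simp
  | succ k =>
    simp only [List.singleton_append, List.getElem_cons_succ, List.getElem_replicate]
    simp

theorem pvIndP_last (w : List Char) (J : Nat) :
    (pvIndP w.length J).getD w.length false = decide (w.length ≤ J) := by
  rw [List.getD_eq_getElem _ _ (by simp [pvIndP])]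
  simp [pvIndP]

-- ===== VERDICT (by name: the statement is the Claim_ definition above) =====
theorem isWordValid_spec : Claim_equal_isWordValid := by
  intro word pr _
  unfold Spec_isWordValid
  simp only [isWordValid, isWordValid_alt]
  set w := word.toList with hw
  have hA := foldA_eq_greedy w pr w.length 0 0 (List.replicate w.length false)
    (by omega) (by omega) (by simp) (by intro j _; simp [List.getD_eq_getElem?_getD])
  simp only [List.drop_zero, List.take_zero, List.all_nil, Bool.true_and] at hA
  -- B side first (its rewrites must not see A's List.range turned into range')
  rw [pvIndP_init w, pvOuter_eq w pr 0 (by omega), pvIndP_last]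
  -- A side
  rw [List.range_eq_range', hA, greedy_eq_sub]
  set Jf := pr.foldl (fun (j : Nat) entry => pvStep w entry j) 0 with hJf
  have hle : Jf ≤ w.length := pvPtr_le w pr 0 (by omega)
  have h1 : decide (w.length ≤ Jf) = decide (Jf = w.length) := by
    simp only [decide_eq_decide]; omega
  have h2 := ptr_eq_sub w pr 0 (by omega)
  simp only [List.drop_zero] at h2
  rw [h1, ← hJf] at *
  rw [h1]
  exact h2.symm
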